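-- pv_equiv track=rewrite | github.com/RickF-dotcom/motor-fgi | fgi_engine.py | _count_adjacencias
-- ===== SOURCE A (Python) =====
-- from typing import Any, Dict, List, Optional, Tuple
--
-- def _count_adjacencias(seq: List[int]) -> int:
--     if not seq:
--         return 0
--     s = sorted(seq)
--     adj = 0
--     for i in range(1, len(s)):
--         if s[i] == s[i - 1] + 1:
--             adj += 1
--     return adj
-- ===== SOURCE B (Python) =====
-- def _count_adjacencias(seq):
--     s = set(seq)
--     m = len(s)
--     run_starts = sum(1 for v in s if v - 1 not in s)
--     return m - run_starts
-- ===== Notes on version B (the rewrite author's own statement) =====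
-- stated objective: alternative
-- what changed: Replaces sort-then-scan-adjacent-pairs with a set-based run count: build set(seq), count run starts (v with v-1 not in the set) and return len(set) minus run starts; no sorting and no positional scan.
import Mathlib
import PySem

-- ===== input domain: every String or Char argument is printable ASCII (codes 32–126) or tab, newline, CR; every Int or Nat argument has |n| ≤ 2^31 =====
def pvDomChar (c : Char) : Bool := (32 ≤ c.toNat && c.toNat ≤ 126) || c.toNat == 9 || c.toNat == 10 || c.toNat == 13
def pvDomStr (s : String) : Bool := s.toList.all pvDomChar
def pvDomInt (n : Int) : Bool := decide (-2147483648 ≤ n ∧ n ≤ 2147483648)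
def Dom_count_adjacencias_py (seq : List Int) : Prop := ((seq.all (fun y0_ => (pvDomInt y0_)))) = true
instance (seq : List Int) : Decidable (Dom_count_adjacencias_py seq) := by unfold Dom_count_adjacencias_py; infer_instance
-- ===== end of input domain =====

-- B replaces A's sort-then-scan of adjacent positions by a set-based run count (len(set) minus the
-- number of run starts); same return value on every input (alternative algorithm).

-- ===== PORT A =====
def count_adjacencias_py (seq : List Int) : Int :=
  if seq = [] then 0
  else
    let s := PySem.List.sorted seq (fun x => x)
    (PySem.List.pyRange 1 (PySem.List.len s) 1).foldl
      (fun adj i =>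
        if PySem.List.pyGetD s i 0 = PySem.List.pyGetD s (i - 1) 0 + 1 then adj + 1 else adj) 0

-- ===== PORT B =====
def count_adjacencias_py_alt (seq : List Int) : Int :=
  let s : PySem.Set Int := PySem.Set.ofList seq
  let m : Int := PySem.Set.len s
  let runStarts : Int :=
    s.foldl (fun acc v => if !(PySem.Set.contains s (v - 1)) then acc + 1 else acc) 0
  m - runStarts

-- ===== PRECONDITION & SPEC =====
def Spec_count_adjacencias_py (seq : List Int) (out : Int) : Prop := out = count_adjacencias_py_alt seq
instance (seq : List Int) (out : Int) : Decidable (Spec_count_adjacencias_py seq out) := by unfold Spec_count_adjacencias_py; infer_instance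

-- ===== CLAIM (what is proved, stated in full; the proofs are below) =====
def Claim_equal_count_adjacencias_py : Prop := ∀ (seq : List Int), Dom_count_adjacencias_py seq → Spec_count_adjacencias_py seq (count_adjacencias_py seq)

-- ===== LEMMAS AND PROOFS =====

-- the canonical count both programs compute: #{distinct v of l with v - 1 also occurring in l}
def pvAdjCard (l : List Int) : Nat :=
  (l.toFinset.filter (fun v => v - 1 ∈ l.toFinset)).card

-- range-indexed consecutive pairs of s are exactly s.zip s.tail
lemma pv_range_map_zip (s : List Int) :
    (List.range (s.length - 1)).map (fun k => (s.getD k 0, s.getD (k + 1) 0)) = s.zip s.tail := by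
  induction s with
  | nil => simp
  | cons a t ih =>
    cases t with
    | nil => simp
    | cons b u =>
      simp only [List.length_cons, Nat.add_sub_cancel, List.range_succ_eq_map, List.map_cons,
        List.map_map, List.tail_cons, List.zip_cons_cons]
      refine congrArg₂ _ rfl ?_
      have ih' := ih
      simp only [List.length_cons, Nat.add_sub_cancel, List.tail_cons] at ih'
      rw [← ih']
      simp [Function.comp]

-- inserting a strictly below everything in T adds one element to the "has predecessor" filter
-- exactly when b = a + 1 (b the minimum of T)
lemma pv_insert_filter (a b : Int) (T : Finset Int) (hT : ∀ x ∈ T, b ≤ x)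
    (hab : a < b) (hbT : b ∈ T) :
    ((insert a T).filter (fun v => v - 1 ∈ insert a T)).card
      = (T.filter (fun v => v - 1 ∈ T)).card + (if b = a + 1 then 1 else 0) := by
  have haT : a ∉ T := fun h => absurd (hT a h) (by omega)
  by_cases hb : b = a + 1
  · have key : (insert a T).filter (fun v => v - 1 ∈ insert a T)
        = insert b (T.filter (fun v => v - 1 ∈ T)) := by
      ext x
      simp only [Finset.mem_filter, Finset.mem_insert]
      constructor
      · rintro ⟨hx, h1⟩
        rcases hx with rfl | hx
        · rcases h1 with h1 | h1
          · omega
          · exact absurd (hT _ h1) (by omega)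
        · rcases h1 with h1 | h1
          · left; omega
          · right; exact ⟨hx, h1⟩
      · rintro (rfl | ⟨hx, h1⟩)
        · exact ⟨Or.inr hbT, Or.inl (by omega)⟩
        · exact ⟨Or.inr hx, Or.inr h1⟩
    have hnb : b ∉ T.filter (fun v => v - 1 ∈ T) := by
      intro h
      have := (Finset.mem_filter.mp h).2
      rw [show b - 1 = a by omega] at this
      exact haT this
    rw [key, Finset.card_insert_of_notMem hnb, if_pos hb]
  · have key : (insert a T).filter (fun v => v - 1 ∈ insert a T)
        = T.filter (fun v => v - 1 ∈ T) := by
      ext x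
      simp only [Finset.mem_filter, Finset.mem_insert]
      constructor
      · rintro ⟨hx, h1⟩
        rcases hx with rfl | hx
        · rcases h1 with h1 | h1
          · omega
          · exact absurd (hT _ h1) (by omega)
        · rcases h1 with h1 | h1
          · exact absurd (hT _ hx) (by omega)
          · exact ⟨hx, h1⟩
      · rintro ⟨hx, h1⟩
        exact ⟨Or.inr hx, Or.inr h1⟩
    rw [key, if_neg hb, Nat.add_zero]

lemma pvAdjCard_cons (a b : Int) (u : List Int) (hT : ∀ x ∈ (b :: u).toFinset, b ≤ x)
    (hlt : a < b) :
    pvAdjCard (a :: b :: u) = pvAdjCard (b :: u) + (if b = a + 1 then 1 else 0) := by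
  unfold pvAdjCard
  rw [List.toFinset_cons (a := a)]
  exact pv_insert_filter a b _ hT hlt (by simp)

-- on a sorted list, the number of adjacent positions holding (x, x + 1) is pvAdjCard
lemma pv_sorted_pairs_card (s : List Int) (hs : s.Pairwise (· ≤ ·)) :
    (s.zip s.tail).countP (fun p => decide (p.2 = p.1 + 1)) = pvAdjCard s := by
  induction s with
  | nil => simp [pvAdjCard]
  | cons a t ih =>
    cases t with
    | nil =>
      have h1 : ¬ (a - 1 = a) := by omega
      simp [pvAdjCard, Finset.filter_singleton, h1]
    | cons b u =>
      have hp := List.pairwise_cons.mp hs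
      have hab : a ≤ b := hp.1 b (by simp)
      have hs' := hp.2
      have ih' := ih hs'
      simp only [List.tail_cons] at ih'
      have hT : ∀ x ∈ (b :: u).toFinset, b ≤ x := by
        intro x hx
        rcases List.mem_cons.mp (List.mem_toFinset.mp hx) with rfl | hx'
        · exact le_refl x
        · exact (List.pairwise_cons.mp hs').1 x hx'
      simp only [List.tail_cons, List.zip_cons_cons, List.countP_cons, ih']
      rcases eq_or_lt_of_le hab with rfl | hlt
      · have h2 : (a :: a :: u).toFinset = (a :: u).toFinset := by simp
        rw [if_neg (by simp), Nat.add_zero]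
        unfold pvAdjCard
        rw [h2]
      · rw [pvAdjCard_cons a b u hT hlt]
        congr 1
        by_cases hb : b = a + 1
        · rw [if_pos hb, if_pos (by simp [hb])]
        · rw [if_neg hb, if_neg (by simp [hb])]

-- counting a "v - 1 occurs" predicate over a duplicate-free list is pvAdjCard's filter card
lemma pv_countP_nodup_card (l : List Int) (hl : l.Nodup) (q : Int → Bool)
    (hq : ∀ x, q x = true ↔ x - 1 ∈ l) :
    l.countP q = (l.toFinset.filter (fun v => v - 1 ∈ l.toFinset)).card := by
  rw [List.countP_eq_length_filter, ← List.toFinset_card_of_nodup (hl.filter _), List.toFinset_filter]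
  congr 1
  apply Finset.filter_congr
  intro x hx
  simp [hq, List.mem_toFinset]

lemma pv_b_eq (seq : List Int) : count_adjacencias_py_alt seq = (pvAdjCard seq : Int) := by
  unfold count_adjacencias_py_alt
  dsimp only
  rw [PySem.List.foldl_count_if (fun v => !(PySem.Set.contains (PySem.Set.ofList seq) (v - 1)))]
  have hlen : PySem.Set.len (PySem.Set.ofList seq) = ((PySem.Set.ofList seq).length : Int) := by
    simp [PySem.Set.len]
  have hsplit := List.length_eq_countP_add_countP
    (fun v => PySem.Set.contains (PySem.Set.ofList seq) (v - 1)) (l := PySem.Set.ofList seq)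
  have hpos : (PySem.Set.ofList seq).countP
      (fun v => PySem.Set.contains (PySem.Set.ofList seq) (v - 1)) = pvAdjCard seq := by
    unfold pvAdjCard
    rw [pv_countP_nodup_card _ (PySem.Set.nodup_ofList seq)
      (fun v => PySem.Set.contains (PySem.Set.ofList seq) (v - 1))
      (fun x => by simp [PySem.Set.mem_ofList])]
    congr 1
    ext x
    simp [List.mem_toFinset, PySem.Set.mem_ofList]
  have hneg : (PySem.Set.ofList seq).countP
        (fun v => !(PySem.Set.contains (PySem.Set.ofList seq) (v - 1)))
      = (PySem.Set.ofList seq).countP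
        (fun v => decide ¬((PySem.Set.contains (PySem.Set.ofList seq) (v - 1)) = true)) := by
    apply List.countP_congr
    intro x _
    simp
  rw [hlen, hneg]
  omega

lemma pv_a_eq (seq : List Int) : count_adjacencias_py seq = (pvAdjCard seq : Int) := by
  by_cases h : seq = []
  · simp [count_adjacencias_py, h, pvAdjCard]
  · unfold count_adjacencias_py
    rw [if_neg h]
    dsimp only
    set s := PySem.List.sorted seq (fun x => x) with hsdef
    have hbody : (fun (adj : Int) (i : Int) =>
          if PySem.List.pyGetD s i 0 = PySem.List.pyGetD s (i - 1) 0 + 1 then adj + 1 else adj)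
        = (fun adj i =>
          if (fun i => decide (PySem.List.pyGetD s i 0 = PySem.List.pyGetD s (i - 1) 0 + 1)) i = true
          then adj + 1 else adj) := by
      funext adj i
      by_cases hc : PySem.List.pyGetD s i 0 = PySem.List.pyGetD s (i - 1) 0 + 1 <;> simp [hc]
    rw [hbody, PySem.List.foldl_count_if, zero_add, PySem.List.pyRange_one]
    have hn : ((PySem.List.len s) - 1).toNat = s.length - 1 := by
      rw [PySem.List.len_eq]; omega
    rw [hn, List.countP_map]
    have hcong : ∀ k ∈ List.range (s.length - 1),
        ((fun i => decide (PySem.List.pyGetD s i 0 = PySem.List.pyGetD s (i - 1) 0 + 1))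
            ∘ (fun k : Nat => (1 : Int) + ↑k)) k = true
          ↔ (fun k : Nat => decide (s.getD (k + 1) 0 = s.getD k 0 + 1)) k = true := by
      intro k _
      have e1 : (1 : Int) + (k : Int) = ((k + 1 : Nat) : Int) := by push_cast; ring
      have e2 : ((k + 1 : Nat) : Int) - 1 = ((k : Nat) : Int) := by push_cast; ring
      simp only [Function.comp_apply, e1, e2, PySem.List.pyGetD_natCast]
    rw [List.countP_congr hcong]
    have hzip : (List.range (s.length - 1)).countP
          (fun k : Nat => decide (s.getD (k + 1) 0 = s.getD k 0 + 1))
        = (s.zip s.tail).countP (fun p => decide (p.2 = p.1 + 1)) := by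
      rw [← pv_range_map_zip s, List.countP_map]
      rfl
    rw [hzip, pv_sorted_pairs_card s (PySem.List.sorted_pairwise seq (fun x => x))]
    have hfin : s.toFinset = seq.toFinset := by
      ext x
      simp [List.mem_toFinset, hsdef, PySem.List.mem_sorted]
    unfold pvAdjCard
    rw [hfin]

-- ===== VERDICT (by name: the statement is the Claim_ definition above) =====
theorem count_adjacencias_py_spec : Claim_equal_count_adjacencias_py := by
  intro seq _
  unfold Spec_count_adjacencias_py
  rw [pv_a_eq, pv_b_eq]
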